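-- pv_equiv track=rewrite | github.com/skytos/fohack | fo.py | same_classes
-- ===== SOURCE A (Python) =====
-- def same(a, b):
--     c = 0
--     for i in range(len(a)):
--         if a[i] == b[i]: c += 1
--     return c
--
-- def same_classes(words):
--     l = len(words)
--     wl = len(words[0])
--     sc = [{} for i in range(l)]
--     for i in range(len(words)):
--         sc[i][wl] = set((i,))
--         for j in range(i+1, len(words)):
--             s = same(words[i], words[j])
--             if s in sc[i]:
--                 sc[i][s].add(j)
--             else:
--                 sc[i][s] = set((j,))
--             if s in sc[j]:
--                 sc[j][s].add(i)
--             else: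
--                 sc[j][s] = set((i,))
--     return sc
-- ===== SOURCE B (Python) =====
-- def same_classes(words):
--     n = len(words)
--     wl = len(words[0])
--     def row(i):
--         d = {}
--         for k in range(n):
--             if k == i:
--                 d[wl] = {i}
--             else:
--                 a, b = (i, k) if i < k else (k, i)
--                 s = sum(1 for p in range(len(words[a])) if words[a][p] == words[b][p])
--                 d.setdefault(s, set()).add(k)
--         return d
--     return [row(i) for i in range(n)]
-- ===== Notes on version B (the rewrite author's own statement) =====
-- stated objective: alternative
-- what changed: B builds each word's class dict independently in one row-wise pass over all indices (no shared mutable list of dicts, no interleaved symmetric updates), instead of A's nested i<j loop that mutates sc[i] and sc[j] simultaneously; match counts are computed inline keyed by the smaller index.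
import Mathlib
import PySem

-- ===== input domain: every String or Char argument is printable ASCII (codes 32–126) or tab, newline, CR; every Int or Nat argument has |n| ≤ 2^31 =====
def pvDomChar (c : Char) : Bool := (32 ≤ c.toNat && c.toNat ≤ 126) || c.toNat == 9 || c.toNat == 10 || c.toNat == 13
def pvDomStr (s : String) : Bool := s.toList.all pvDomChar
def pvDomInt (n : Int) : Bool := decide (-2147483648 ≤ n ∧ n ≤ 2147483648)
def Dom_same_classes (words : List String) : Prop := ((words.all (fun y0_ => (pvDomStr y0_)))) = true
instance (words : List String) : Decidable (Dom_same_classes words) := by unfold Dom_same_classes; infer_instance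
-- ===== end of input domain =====

-- B builds each row's dict independently in a single pass over all indices instead of A's
-- interleaved symmetric mutation of a shared list of dicts; same cost, different decomposition.

-- ===== PORT A =====
-- same(a, b): count of positions i < len(a) with a[i] == b[i]
def pvSameA (a b : String) : Int :=
  (PySem.List.pyRange 0 (a.toList.length : Int)).foldl
    (fun c i => if PySem.List.pyGet? a.toList i = PySem.List.pyGet? b.toList i then c + 1 else c) 0

-- 'if s in d: d[s].add(x) else: d[s] = set((x,))'
def pvAddA (d : PySem.Dict Int (PySem.Set Int)) (s x : Int) : PySem.Dict Int (PySem.Set Int) :=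
  if d.contains s then d.insert s (PySem.Set.add (d.getD s PySem.Set.empty) x)
  else d.insert s (PySem.Set.ofList [x])

def same_classes (words : List String) : List (List (Int × List Int)) :=
  let l : Int := (words.length : Int)
  let wl : Int := (((PySem.List.pyGet? words 0).getD "").toList.length : Int)
  let sc0 : List (PySem.Dict Int (PySem.Set Int)) :=
    (PySem.List.pyRange 0 l).map (fun _ => PySem.Dict.empty)
  let sc := (PySem.List.pyRange 0 l).foldl (fun sc i =>
      let sc1 := sc.modify i.toNat (fun d => d.insert wl (PySem.Set.ofList [i]))
      (PySem.List.pyRange (i + 1) l).foldl (fun scc j =>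
        let s := pvSameA ((PySem.List.pyGet? words i).getD "") ((PySem.List.pyGet? words j).getD "")
        let sc2 := scc.modify i.toNat (fun d => pvAddA d s j)
        sc2.modify j.toNat (fun d => pvAddA d s i)) sc1) sc0
  sc.map PySem.Dict.items

-- ===== PORT B =====
-- sum(1 for p in range(len(a)) if a[p] == b[p])
def pvCountB (a b : String) : Int :=
  (List.range a.toList.length).foldl
    (fun c (p : Nat) => if PySem.List.pyGet? a.toList (p : Int) = PySem.List.pyGet? b.toList (p : Int) then c + 1 else c) 0

-- 'd.setdefault(s, set()).add(x)'
def pvAddB (d : PySem.Dict Int (PySem.Set Int)) (s x : Int) : PySem.Dict Int (PySem.Set Int) :=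
  let d1 := d.setdefault s PySem.Set.empty
  d1.insert s (PySem.Set.add (d1.getD s PySem.Set.empty) x)

def pvRowB (words : List String) (wl : Int) (n i : Nat) : PySem.Dict Int (PySem.Set Int) :=
  (List.range n).foldl (fun d k =>
    if k = i then d.insert wl (PySem.Set.ofList [(i : Int)])
    else
      let a := if i < k then i else k
      let b := if i < k then k else i
      let s := pvCountB ((PySem.List.pyGet? words (a : Int)).getD "")
                        ((PySem.List.pyGet? words (b : Int)).getD "")
      pvAddB d s (k : Int)) PySem.Dict.empty

def same_classes_alt (words : List String) : List (List (Int × List Int)) :=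
  let n := words.length
  let wl : Int := (((PySem.List.pyGet? words 0).getD "").toList.length : Int)
  (List.range n).map (fun i => (pvRowB words wl n i).items)

-- ===== PRECONDITION & SPEC =====
-- Pre_ excludes exactly the inputs where Python A raises: the empty list (IndexError on
-- words[0]) and lists whose word lengths ever decrease (same(a, b) raises IndexError on b
-- when a later word is shorter than an earlier one).
def Pre_same_classes (words : List String) : Prop :=
  words ≠ [] ∧ (words.map (fun w => w.toList.length)).Pairwise (· ≤ ·)
instance (words : List String) : Decidable (Pre_same_classes words) := by
  unfold Pre_same_classes; infer_instance

def pvWitness_same_classes : List String := ["ab", "ac", "bcd"]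

def Spec_same_classes (words : List String) (out : List (List (Int × List Int))) : Prop := out = same_classes_alt words
instance (words : List String) (out : List (List (Int × List Int))) : Decidable (Spec_same_classes words out) := by unfold Spec_same_classes; infer_instance

-- ===== CLAIM (what is proved, stated in full; the proofs are below) =====
def Claim_equal_same_classes : Prop := ∀ (words : List String), Dom_same_classes words → Pre_same_classes words → Spec_same_classes words (same_classes words)

-- ===== LEMMAS AND PROOFS =====

-- abbreviations for the proof
def pvw (ws : List String) (i : Nat) : String := (PySem.List.pyGet? ws (i : Int)).getD ""

def pvCnt (ws : List String) (x y : Nat) : Int := pvSameA (pvw ws x) (pvw ws y)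

-- row m of A's state after t outer iterations, for m ≥ t
def pvPre (ws : List String) (t m : Nat) : PySem.Dict Int (PySem.Set Int) :=
  (List.range t).foldl (fun d k => pvAddA d (pvCnt ws k m) (k : Int)) PySem.Dict.empty

-- row t of A's state during outer iteration t, inner index up to u
def pvPartial (ws : List String) (wl : Int) (t u : Nat) : PySem.Dict Int (PySem.Set Int) :=
  (List.range' (t + 1) (u - (t + 1))).foldl (fun d j => pvAddA d (pvCnt ws t j) (j : Int))
    ((pvPre ws t t).insert wl (PySem.Set.ofList [(t : Int)]))

def pvFull (ws : List String) (wl : Int) (n m : Nat) : PySem.Dict Int (PySem.Set Int) :=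
  pvPartial ws wl m n

def pvState (ws : List String) (wl : Int) (n t : Nat) : List (PySem.Dict Int (PySem.Set Int)) :=
  (List.range n).map (fun m => if m < t then pvFull ws wl n m else pvPre ws t m)

def pvInner (ws : List String) (wl : Int) (n t u : Nat) : List (PySem.Dict Int (PySem.Set Int)) :=
  (List.range n).map (fun m =>
    if m < t then pvFull ws wl n m
    else if m = t then pvPartial ws wl t u
    else if m < u then pvPre ws (t + 1) m
    else pvPre ws t m)

def pvStepI (ws : List String) (t : Nat) (sc : List (PySem.Dict Int (PySem.Set Int))) (u : Nat) :
    List (PySem.Dict Int (PySem.Set Int)) :=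
  (sc.modify t (fun d => pvAddA d (pvCnt ws t u) (u : Int))).modify u
    (fun d => pvAddA d (pvCnt ws t u) (t : Int))

lemma pvPyRange_nil (a b : Int) (h : b ≤ a) : PySem.List.pyRange a b = [] := by
  rw [List.eq_nil_iff_forall_not_mem]
  intro x hx
  rw [PySem.List.mem_pyRange_one] at hx
  omega

lemma pvPyRange_aux (k u : Nat) :
    PySem.List.pyRange (u : Int) ((u + k : Nat) : Int) = (List.range' u k).map (fun (j : Nat) => (j : Int)) := by
  induction k with
  | zero =>
    rw [Nat.add_zero, List.range'_zero, List.map_nil]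
    exact pvPyRange_nil _ _ le_rfl
  | succ k ih =>
    have h1 : ((u + (k+1) : Nat) : Int) = ((u + k : Nat) : Int) + 1 := by push_cast; ring
    rw [h1, PySem.List.pyRange_one_succ_right (by push_cast; omega), ih, List.range'_concat]
    simp

-- pyRange between two Nat casts
lemma pvPyRange_cast (u n : Nat) :
    PySem.List.pyRange (u : Int) (n : Int) = (List.range' u (n - u)).map (fun (j : Nat) => (j : Int)) := by
  rcases Nat.lt_or_ge n u with h | h
  · rw [Nat.sub_eq_zero_of_le (by omega), List.range'_zero, List.map_nil]
    exact pvPyRange_nil _ _ (by exact_mod_cast Nat.le_of_lt h)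
  · have hn : n = u + (n - u) := by omega
    rw [hn, pvPyRange_aux]
    simp

lemma pvCountB_eq (a b : String) : pvCountB a b = pvSameA a b := by
  unfold pvCountB pvSameA
  rw [PySem.List.pyRange_zero_natCast, List.foldl_map]

lemma pvAddB_eq (d : PySem.Dict Int (PySem.Set Int)) (s x : Int) : pvAddB d s x = pvAddA d s x := by
  unfold pvAddB pvAddA
  by_cases h : d.contains s
  · rw [if_pos h, PySem.Dict.setdefault_of_contains _ _ h]
  · rw [if_neg h, PySem.Dict.setdefault_of_not_contains _ _ (by simpa using h)]
    show (d.insert s PySem.Set.empty).insert s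
        (((d.insert s PySem.Set.empty).getD s PySem.Set.empty).add x) = d.insert s (PySem.Set.ofList [x])
    rw [PySem.Dict.getD_insert_self, PySem.Dict.insert_insert_self]
    rfl

lemma pvModify_map_range {α : Type} (n : Nat) (g : Nat → α) (j : Nat) (f : α → α) :
    ((List.range n).map g).modify j f = (List.range n).map (fun m => if m = j then f (g j) else g m) := by
  apply List.ext_getElem (by simp)
  intro k h1 h2
  simp only [List.getElem_modify, List.getElem_map, List.getElem_range]
  by_cases hk : j = k
  · subst hk; simp
  · rw [if_neg hk, if_neg (by omega)]

lemma pvPre_succ (ws : List String) (t m : Nat) :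
    pvPre ws (t + 1) m = pvAddA (pvPre ws t m) (pvCnt ws t m) (t : Int) := by
  unfold pvPre
  rw [List.range_succ, List.foldl_append]
  rfl

lemma pvPartial_succ (ws : List String) (wl : Int) (t u : Nat) (h : t < u) :
    pvPartial ws wl t (u + 1) = pvAddA (pvPartial ws wl t u) (pvCnt ws t u) (u : Int) := by
  unfold pvPartial
  have h1 : u + 1 - (t + 1) = (u - (t + 1)) + 1 := by omega
  rw [h1, List.range'_concat]
  have h2 : t + 1 + 1 * (u - (t + 1)) = u := by omega
  rw [h2, List.foldl_append]
  rfl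

lemma pvInnerStep (ws : List String) (wl : Int) (n t u : Nat) (htu : t < u) :
    pvStepI ws t (pvInner ws wl n t u) u = pvInner ws wl n t (u + 1) := by
  unfold pvStepI pvInner
  rw [pvModify_map_range, pvModify_map_range]
  apply List.map_congr_left
  intro m hm
  by_cases hmu : m = u
  · subst hmu
    rw [if_pos rfl, if_neg (by omega), if_neg (by omega), if_neg (by omega), if_neg (by omega),
        if_neg (by omega), if_neg (by omega), if_pos (by omega)]
    exact (pvPre_succ ws t m).symm
  · rw [if_neg hmu]
    by_cases hmt : m = t
    · subst hmt
      rw [if_pos rfl, if_neg (by omega), if_pos rfl, if_neg (by omega), if_pos rfl]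
      exact (pvPartial_succ ws wl m u htu).symm
    · rw [if_neg hmt]
      by_cases hlt : m < t
      · rw [if_pos hlt, if_pos hlt]
      · rw [if_neg hlt, if_neg hlt, if_neg hmt, if_neg hmt]
        by_cases hmu' : m < u
        · rw [if_pos hmu', if_pos (by omega)]
        · rw [if_neg hmu', if_neg (by omega)]

lemma pvInnerFold (ws : List String) (wl : Int) (n t : Nat) :
    ∀ (r u : Nat), t < u →
      List.foldl (pvStepI ws t) (pvInner ws wl n t u) (List.range' u r) = pvInner ws wl n t (u + r) := by
  intro r
  induction r with
  | zero => intro u _; simp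
  | succ r ih =>
    intro u htu
    rw [List.range'_succ, List.foldl_cons, pvInnerStep ws wl n t u htu, ih (u + 1) (by omega)]
    congr 1
    omega

lemma pvOuterStep (ws : List String) (wl : Int) (n t : Nat) (ht : t < n) :
    List.foldl (pvStepI ws t)
      ((pvState ws wl n t).modify t (fun d => d.insert wl (PySem.Set.ofList [(t : Int)])))
      (List.range' (t + 1) (n - (t + 1))) = pvState ws wl n (t + 1) := by
  unfold pvState
  rw [pvModify_map_range]
  have h1 : ((List.range n).map (fun m =>
      if m = t then (if t < t then pvFull ws wl n t else pvPre ws t t).insert wl (PySem.Set.ofList [(t : Int)])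
      else if m < t then pvFull ws wl n m else pvPre ws t m)) = pvInner ws wl n t (t + 1) := by
    unfold pvInner
    apply List.map_congr_left
    intro m hm
    by_cases hmt : m = t
    · subst hmt
      rw [if_pos rfl, if_neg (by omega), if_pos rfl, if_neg (by omega)]
      unfold pvPartial
      rw [Nat.sub_self, List.range'_zero, List.foldl_nil]
    · rw [if_neg hmt]
      by_cases hlt : m < t
      · rw [if_pos hlt, if_pos hlt]
      · rw [if_neg hlt, if_neg hlt, if_neg hmt, if_neg (by omega)]
  rw [h1, pvInnerFold ws wl n t (n - (t + 1)) (t + 1) (by omega)]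
  have h2 : t + 1 + (n - (t + 1)) = n := by omega
  rw [h2]
  unfold pvInner
  apply List.map_congr_left
  intro m hm
  rw [List.mem_range] at hm
  by_cases hlt : m < t
  · rw [if_pos hlt, if_pos (by omega)]
  · rw [if_neg hlt]
    by_cases hmt : m = t
    · subst hmt
      rw [if_pos rfl, if_pos (by omega)]
      rfl
    · rw [if_neg hmt, if_pos hm, if_neg (by omega)]

lemma pvRowB_eq_full (ws : List String) (wl : Int) (n i : Nat) (hi : i < n) :
    pvRowB ws wl n i = pvFull ws wl n i := by
  unfold pvRowB pvFull pvPartial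
  have hsplit : List.range n = (List.range' 0 i ++ List.range' i 1) ++ List.range' (i + 1) (n - (i + 1)) := by
    have h1 := List.range'_append (s := 0) (m := i) (n := 1) (step := 1)
    have h2 := List.range'_append (s := 0) (m := i + 1) (n := n - (i + 1)) (step := 1)
    simp only [Nat.zero_add, Nat.one_mul] at h1 h2
    rw [List.range_eq_range', h1, h2]
    congr 1
    omega
  rw [hsplit, List.foldl_append, List.foldl_append]
  have seg1 : List.foldl (fun d k =>
        if k = i then d.insert wl (PySem.Set.ofList [(i : Int)])
        else
          let a := if i < k then i else k
          let b := if i < k then k else i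
          let s := pvCountB ((PySem.List.pyGet? ws (a : Int)).getD "")
                            ((PySem.List.pyGet? ws (b : Int)).getD "")
          pvAddB d s (k : Int)) PySem.Dict.empty (List.range' 0 i)
      = pvPre ws i i := by
    unfold pvPre
    rw [List.range_eq_range']
    apply PySem.List.foldl_congr_mem
    intro acc x hx
    rw [List.mem_range'_1] at hx
    rw [if_neg (by omega)]
    show pvAddB acc (pvCountB ((PySem.List.pyGet? ws ((if i < x then i else x) : Nat)).getD "")
        ((PySem.List.pyGet? ws ((if i < x then x else i) : Nat)).getD "")) (x : Int)
      = pvAddA acc (pvCnt ws x i) (x : Int)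
    rw [if_neg (by omega), if_neg (by omega), pvAddB_eq, pvCountB_eq]
    rfl
  rw [seg1]
  have seg2 : List.foldl (fun d k =>
        if k = i then d.insert wl (PySem.Set.ofList [(i : Int)])
        else
          let a := if i < k then i else k
          let b := if i < k then k else i
          let s := pvCountB ((PySem.List.pyGet? ws (a : Int)).getD "")
                            ((PySem.List.pyGet? ws (b : Int)).getD "")
          pvAddB d s (k : Int)) (pvPre ws i i) (List.range' i 1)
      = (pvPre ws i i).insert wl (PySem.Set.ofList [(i : Int)]) := by
    rw [List.range'_one, List.foldl_cons, List.foldl_nil, if_pos rfl]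
  rw [seg2]
  apply PySem.List.foldl_congr_mem
  intro acc x hx
  rw [List.mem_range'_1] at hx
  rw [if_neg (by omega)]
  show pvAddB acc (pvCountB ((PySem.List.pyGet? ws ((if i < x then i else x) : Nat)).getD "")
      ((PySem.List.pyGet? ws ((if i < x then x else i) : Nat)).getD "")) (x : Int)
    = pvAddA acc (pvCnt ws i x) (x : Int)
  rw [if_pos (by omega), if_pos (by omega), pvAddB_eq, pvCountB_eq]
  rfl

lemma pvOuterFold (ws : List String) (wl : Int) (n : Nat) :
    ∀ (r t : Nat), t + r ≤ n →
      List.foldl (fun sc t => List.foldl (pvStepI ws t)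
          (sc.modify t (fun d => d.insert wl (PySem.Set.ofList [(t : Int)])))
          (List.range' (t + 1) (n - (t + 1)))) (pvState ws wl n t) (List.range' t r)
        = pvState ws wl n (t + r) := by
  intro r
  induction r with
  | zero => intro t _; simp
  | succ r ih =>
    intro t htr
    rw [List.range'_succ, List.foldl_cons, pvOuterStep ws wl n t (by omega), ih (t + 1) (by omega)]
    congr 1
    omega

-- ===== VERDICT (by name: the statement is the Claim_ definition above) =====
theorem same_classes_spec : Claim_equal_same_classes := by
  intro words _ _
  unfold Spec_same_classes
  simp only [same_classes, same_classes_alt]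
  rw [PySem.List.pyRange_zero_natCast, List.map_map, List.foldl_map]
  have hinit : (List.range words.length).map
        ((fun _ => (PySem.Dict.empty : PySem.Dict Int (PySem.Set Int))) ∘ (fun (j : Nat) => (j : Int)))
      = pvState words (((PySem.List.pyGet? words 0).getD "").toList.length : Int) words.length 0 := by
    unfold pvState
    apply List.map_congr_left
    intro m _
    rw [if_neg (by omega)]
    rfl
  rw [hinit]
  have houter : List.foldl
      (fun sc (t : Nat) =>
        List.foldl
          (fun scc (j : Int) =>
            let s := pvSameA ((PySem.List.pyGet? words ((t : Nat) : Int)).getD "") ((PySem.List.pyGet? words j).getD "")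
            let sc2 := scc.modify ((t : Nat) : Int).toNat (fun d => pvAddA d s j)
            sc2.modify j.toNat (fun d => pvAddA d s ((t : Nat) : Int)))
          (sc.modify ((t : Nat) : Int).toNat
            (fun d => d.insert (((PySem.List.pyGet? words 0).getD "").toList.length : Int)
              (PySem.Set.ofList [((t : Nat) : Int)])))
          (PySem.List.pyRange (((t : Nat) : Int) + 1) (words.length : Int)))
      (pvState words (((PySem.List.pyGet? words 0).getD "").toList.length : Int) words.length 0)
      (List.range words.length)
      = pvState words (((PySem.List.pyGet? words 0).getD "").toList.length : Int) words.length words.length := by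
    rw [PySem.List.foldl_congr_mem _ _
      (fun sc t => List.foldl (pvStepI words t)
        (sc.modify t (fun d => d.insert (((PySem.List.pyGet? words 0).getD "").toList.length : Int)
          (PySem.Set.ofList [(t : Int)])))
        (List.range' (t + 1) (words.length - (t + 1)))) _ ?_]
    · have h := pvOuterFold words (((PySem.List.pyGet? words 0).getD "").toList.length : Int)
        words.length words.length 0 (by omega)
      rw [← List.range_eq_range'] at h
      simpa using h
    · intro acc t _
      have hc : ((t : Int) + 1) = ((t + 1 : Nat) : Int) := by push_cast; ring
      show List.foldl _ _ (PySem.List.pyRange ((t : Int) + 1) (words.length : Int)) = _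
      rw [hc, pvPyRange_cast, List.foldl_map]
      rfl
  rw [houter]
  unfold pvState
  rw [List.map_map]
  apply List.map_congr_left
  intro m hm
  rw [List.mem_range] at hm
  show PySem.Dict.items (if m < words.length then _ else _) = _
  rw [if_pos hm, pvRowB_eq_full _ _ _ _ hm]
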